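-- pv_equiv track=rewrite | github.com/maryam1357/Sentiment_Analysis_Classifier | sentiment_analysis_ratepig_stop_review.py | vote
-- ===== SOURCE A (Python) =====
-- def vote(vocab,pol_words):
--     vote_count = 0
--     for word in vocab.keys():
--         if word in pol_words.keys():
--             polarity = pol_words[word]
--         else:
--             polarity = 0
--         value = vocab[word]
--         vote_count += polarity*value
--     return vote_count
-- ===== SOURCE B (Python) =====
-- def vote(vocab, pol_words):
--     v = sorted(vocab.items(), key=lambda kv: kv[0])
--     p = sorted(pol_words.items(), key=lambda kv: kv[0])
--     total = 0
--     i = j = 0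
--     while i < len(v) and j < len(p):
--         if v[i][0] == p[j][0]:
--             total += v[i][1] * p[j][1]
--             i += 1
--             j += 1
--         elif v[i][0] < p[j][0]:
--             i += 1
--         else:
--             j += 1
--     return total
-- ===== Notes on version B (the rewrite author's own statement) =====
-- stated objective: alternative
-- what changed: B sorts both item lists by word and computes the dot product with a two-pointer sorted merge, instead of A's single pass over vocab with per-word dict lookups and a zero-polarity else-branch.
import Mathlib
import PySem

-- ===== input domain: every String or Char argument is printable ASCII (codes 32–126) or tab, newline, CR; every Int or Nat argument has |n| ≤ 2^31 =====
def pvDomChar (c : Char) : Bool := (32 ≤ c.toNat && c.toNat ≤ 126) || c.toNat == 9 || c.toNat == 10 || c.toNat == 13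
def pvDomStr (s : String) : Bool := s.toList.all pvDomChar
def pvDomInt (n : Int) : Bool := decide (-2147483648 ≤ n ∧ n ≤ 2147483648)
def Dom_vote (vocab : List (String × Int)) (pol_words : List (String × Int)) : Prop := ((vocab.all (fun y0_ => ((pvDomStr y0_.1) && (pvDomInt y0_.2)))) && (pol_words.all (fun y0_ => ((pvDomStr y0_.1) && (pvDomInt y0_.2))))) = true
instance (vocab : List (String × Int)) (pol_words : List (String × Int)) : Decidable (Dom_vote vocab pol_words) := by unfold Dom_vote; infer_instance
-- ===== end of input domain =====

-- B replaces A's single pass over vocab with dict lookups (zero-polarity else-branch) by a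
-- different algorithm: sort both item lists by word, then a two-pointer sorted merge.

-- ===== PORT A =====
def vote (vocab : List (String × Int)) (pol_words : List (String × Int)) : Int :=
  -- vote_count = 0; for word in vocab.keys(): ...
  (PySem.Dict.ofList vocab).keys.foldl (fun vote_count word =>
    let polarity : Int :=
      if (PySem.Dict.ofList pol_words).contains word
      then (PySem.Dict.ofList pol_words).getD word 0 else 0
    let value : Int := (PySem.Dict.ofList vocab).getD word 0   -- word ∈ keys, so this is vocab[word]
    vote_count + polarity * value) 0

-- ===== PORT B =====
-- Source B's 'while i < len(v) and j < len(p)' index loop, transcribed as the structural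
-- recursion on the two remaining suffixes v[i:], p[j:] (exact: same comparisons, same order).
def voteMerge : List (String × Int) → List (String × Int) → Int
  | [], _ => 0
  | _ :: _, [] => 0
  | (k, a) :: ls, (j, b) :: ms =>
    if k == j then a * b + voteMerge ls ms
    else if k < j then voteMerge ls ((j, b) :: ms)
    else voteMerge ((k, a) :: ls) ms

def vote_alt (vocab : List (String × Int)) (pol_words : List (String × Int)) : Int :=
  let v := PySem.List.sorted (PySem.Dict.ofList vocab).items (fun kv => kv.1)
  let p := PySem.List.sorted (PySem.Dict.ofList pol_words).items (fun kv => kv.1)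
  voteMerge v p

-- ===== PRECONDITION & SPEC =====
def Spec_vote (vocab : List (String × Int)) (pol_words : List (String × Int)) (out : Int) : Prop := out = vote_alt vocab pol_words
instance (vocab : List (String × Int)) (pol_words : List (String × Int)) (out : Int) : Decidable (Spec_vote vocab pol_words out) := by unfold Spec_vote; infer_instance

-- ===== CLAIM (what is proved, stated in full; the proofs are below) =====
def Claim_equal_vote : Prop := ∀ (vocab : List (String × Int)) (pol_words : List (String × Int)), Dom_vote vocab pol_words → Spec_vote vocab pol_words (vote vocab pol_words)

-- ===== LEMMAS AND PROOFS =====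

-- plain assoc-list lookup (first match, default 0), for the proofs
def lk : List (String × Int) → String → Int
  | [], _ => 0
  | (k, a) :: rest, w => if k == w then a else lk rest w

-- the dot-product sum both programs compute, written over an explicit items list
def dsum (L M : List (String × Int)) : Int :=
  (L.map (fun pr => pr.2 * lk M pr.1)).sum

theorem lk_of_not_mem (M : List (String × Int)) (w : String)
    (h : w ∉ M.map (·.1)) : lk M w = 0 := by
  induction M with
  | nil => rfl
  | cons pr rest ih =>
    obtain ⟨k, b⟩ := pr
    simp only [List.map_cons, List.mem_cons, not_or] at h
    have hk : (k == w) = false := by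
      simp only [beq_eq_false_iff_ne, ne_eq]
      exact fun e => h.1 (by simp [e])
    simp [lk, hk, ih h.2]

theorem dsum_nil_right (L : List (String × Int)) : dsum L [] = 0 := by
  induction L with
  | nil => rfl
  | cons pr rest ih => simp only [dsum, List.map_cons, List.sum_cons, lk] at *; omega

-- dropping M's head (j, b) does not change the sum when no key of L equals j
theorem dsum_drop_head (L ms : List (String × Int)) (j : String) (b : Int)
    (h : ∀ pr ∈ L, pr.1 ≠ j) : dsum L ((j, b) :: ms) = dsum L ms := by
  induction L with
  | nil => rfl
  | cons pr rest ih =>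
    obtain ⟨k, a⟩ := pr
    have hk : (j == k) = false := by
      simp only [beq_eq_false_iff_ne, ne_eq]
      exact fun e => (h (k, a) (by simp)) e.symm
    simp only [dsum, List.map_cons, List.sum_cons] at *
    rw [show lk ((j, b) :: ms) k = lk ms k from by simp [lk, hk],
        ih (fun pr hpr => h pr (by simp [hpr]))]

-- the merge of two strictly key-sorted lists is the dot-product sum
theorem voteMerge_eq_dsum (L M : List (String × Int))
    (hL : L.Pairwise (fun x y => x.1 < y.1)) (hM : M.Pairwise (fun x y => x.1 < y.1)) :
    voteMerge L M = dsum L M := by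
  induction L generalizing M with
  | nil => cases M <;> simp [voteMerge, dsum]
  | cons pr ls ihL =>
    obtain ⟨k, a⟩ := pr
    rw [List.pairwise_cons] at hL
    induction M with
    | nil => rw [dsum_nil_right]; simp [voteMerge]
    | cons qr ms ihM =>
      obtain ⟨j, b⟩ := qr
      rw [List.pairwise_cons] at hM
      by_cases hkj : k = j
      · subst hkj
        have hdrop : dsum ls ms = dsum ls ((k, b) :: ms) := by
          rw [dsum_drop_head ls ms k b (fun pr hpr => ne_of_gt (hL.1 pr hpr))]
        simp only [voteMerge, beq_self_eq_true, if_true, dsum, List.map_cons, List.sum_cons]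
        rw [show lk ((k, b) :: ms) k = b from by simp [lk],
            ihL ms hL.2 hM.2]
        simp only [dsum] at hdrop ⊢
        rw [hdrop]
      · have hbeq : (k == j) = false := by simp [hkj]
        by_cases hlt : k < j
        · -- k absent from (j,b)::ms: every key there is ≥ j > k
          have h0 : lk ((j, b) :: ms) k = 0 := by
            apply lk_of_not_mem
            simp only [List.map_cons, List.mem_cons, not_or]
            refine ⟨hkj, fun hmem => ?_⟩
            obtain ⟨pr, hpr, hfst⟩ := List.mem_map.mp hmem
            exact absurd (hfst ▸ hM.1 pr hpr) (by
              intro h; exact lt_irrefl k (lt_trans hlt h))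
          simp only [voteMerge, hbeq, Bool.false_eq_true, if_false, hlt, if_true]
          rw [ihL ((j, b) :: ms) hL.2 (List.pairwise_cons.mpr hM)]
          simp only [dsum, List.map_cons, List.sum_cons]
          rw [h0]; ring
        · -- j < k: j is below every key of (k,a)::ls
          have hjk : j < k := lt_of_le_of_ne (not_lt.mp hlt) (fun e => hkj e.symm)
          simp only [voteMerge, hbeq, Bool.false_eq_true, if_false, hlt, if_false]
          rw [ihM hM.2]
          rw [dsum_drop_head ((k, a) :: ls) ms j b (fun pr hpr => ?_)]
          rcases List.mem_cons.mp hpr with h | h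
          · subst h; exact ne_of_gt hjk
          · exact ne_of_gt (lt_trans hjk (hL.1 pr h))

-- first-match lookup is permutation-invariant when keys are nodup
theorem lk_perm (M M' : List (String × Int)) (hp : M.Perm M')
    (hn : (M.map (·.1)).Nodup) (w : String) : lk M w = lk M' w := by
  induction hp with
  | nil => rfl
  | cons x _ ih =>
    obtain ⟨k, a⟩ := x
    simp only [List.map_cons, List.nodup_cons] at hn
    simp only [lk]
    by_cases hk : (k == w) = true
    · simp [hk]
    · simp only [hk, Bool.false_eq_true, if_false]; exact ih hn.2
  | swap x y l =>
    obtain ⟨k, a⟩ := x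
    obtain ⟨j, b⟩ := y
    simp only [List.map_cons, List.nodup_cons, List.mem_cons, not_or] at hn
    by_cases hj : (j == w) = true
    · have hk : (k == w) = false := by
        simp only [beq_eq_false_iff_ne, ne_eq]
        intro e; exact hn.1.1 (by rw [e, eq_of_beq hj])
      simp [lk, hj, hk]
    · simp only [lk]
      by_cases hk : (k == w) = true <;>
        simp [hk, hj]
  | trans p1 p2 ih1 ih2 =>
    rw [ih1 hn, ih2]
    exact (p1.map (·.1)).nodup_iff.mp hn

theorem foldl_add_sum (l : List String) (f : String → Int) (acc : Int) :
    l.foldl (fun c w => c + f w) acc = acc + (l.map f).sum := by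
  induction l generalizing acc with
  | nil => simp
  | cons x xs ih => simp [List.foldl_cons, ih]; ring

-- bridge: PySem.Dict getD is lk on the items list
theorem getD_eq_lk (L : List (String × Int)) (w : String) :
    (PySem.Dict.mk L).getD w 0 = lk L w := by
  induction L with
  | nil => rfl
  | cons pr rest ih =>
    obtain ⟨k, a⟩ := pr
    rw [PySem.Dict.getD_eq_get?_getD, PySem.Dict.get?_mk_cons]
    by_cases hk : (k == w) = true
    · simp [lk, hk]
    · simp only [hk, Bool.false_eq_true, if_false, lk]
      rw [← PySem.Dict.getD_eq_get?_getD, ih]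

theorem contains_false_lk (d : PySem.Dict String Int) (w : String)
    (h : ¬ d.contains w = true) : lk d.items w = 0 := by
  apply lk_of_not_mem
  intro hmem
  obtain ⟨pr, hpr, hfst⟩ := List.mem_map.mp hmem
  exact h (by
    rcases d with ⟨L⟩
    simp only [PySem.Dict.contains_mk]
    exact List.any_eq_true.mpr ⟨pr, hpr, by simp [hfst]⟩)

-- a sorted items list of a dict has strictly increasing keys (keys are nodup)
theorem sorted_items_strict (d : PySem.Dict String Int)
    (hn : (d.items.map (·.1)).Nodup) :
    (PySem.List.sorted d.items (fun kv => kv.1)).Pairwise (fun x y => x.1 < y.1) := by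
  have hle := PySem.List.sorted_pairwise (xs := d.items) (key := fun kv => kv.1)
  have hperm : ((PySem.List.sorted d.items (fun kv => kv.1)).map (·.1)).Perm (d.items.map (·.1)) :=
    (PySem.List.sorted_perm d.items (fun kv => kv.1) false).map _
  have hn' : ((PySem.List.sorted d.items (fun kv => kv.1)).map (·.1)).Nodup :=
    hperm.nodup_iff.mpr hn
  have hpn : (PySem.List.sorted d.items (fun kv => kv.1)).Pairwise (fun x y => x.1 ≠ y.1) :=
    List.pairwise_map.mp hn'
  exact (hle.and hpn).imp (fun h => lt_of_le_of_ne h.1 h.2)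

-- ===== VERDICT (by name: the statement is the Claim_ definition above) =====
theorem vote_spec : Claim_equal_vote := by
  intro vocab pol_words _
  unfold Spec_vote vote vote_alt
  set v := PySem.Dict.ofList vocab with hv
  set p := PySem.Dict.ofList pol_words with hp
  have hvn : (v.items.map (·.1)).Nodup := PySem.Dict.nodup_keys_ofList vocab
  have hpn : (p.items.map (·.1)).Nodup := PySem.Dict.nodup_keys_ofList pol_words
  set Ls := PySem.List.sorted v.items (fun kv => kv.1) with hLs
  set Ps := PySem.List.sorted p.items (fun kv => kv.1) with hPs
  -- A's loop body: the if/else is exactly lk on p.items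
  have hbody : ∀ w : String,
      (if p.contains w then p.getD w 0 else 0) = lk p.items w := by
    intro w
    by_cases hc : p.contains w
    · rcases p with ⟨L⟩; simp [hc, getD_eq_lk]
    · simp [hc, contains_false_lk p w hc]
  -- A's fold = dot-product sum over v.items
  have hA : (v.keys.foldl (fun vote_count word =>
        vote_count + (if p.contains word then p.getD word 0 else 0) * v.getD word 0) 0)
      = (v.items.map (fun pr => lk p.items pr.1 * pr.2)).sum := by
    rw [show (fun (vote_count : Int) (word : String) =>
        vote_count + (if p.contains word then p.getD word 0 else 0) * v.getD word 0)
      = (fun c w => c + lk p.items w * lk v.items w) from by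
        funext c w; rw [hbody w]; rcases v with ⟨L⟩; rw [getD_eq_lk]]
    rw [foldl_add_sum]
    rw [show v.keys = v.items.map (·.1) from rfl, List.map_map]
    have : (v.items.map ((fun w => lk p.items w * lk v.items w) ∘ (·.1)))
        = v.items.map (fun pr => lk p.items pr.1 * pr.2) := by
      apply List.map_congr_left
      intro pr hpr
      obtain ⟨k, val⟩ := pr
      have hg : v.get? k = some val := PySem.Dict.get?_of_mem_items v hpr hvn
      have h2 : lk v.items k = val := by
        rcases v with ⟨L⟩
        rw [← getD_eq_lk, PySem.Dict.getD_eq_get?_getD, hg]; rfl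
      simp [Function.comp, h2]
    rw [this]; ring
  rw [hA]
  -- B's merge = dot-product sum over the sorted lists
  have hLstrict : Ls.Pairwise (fun x y => x.1 < y.1) := sorted_items_strict v hvn
  have hPstrict : Ps.Pairwise (fun x y => x.1 < y.1) := sorted_items_strict p hpn
  rw [voteMerge_eq_dsum Ls Ps hLstrict hPstrict]
  unfold dsum
  -- replace lk Ps by lk p.items (permutation, nodup keys) and reorder factors
  have hlkP : ∀ w, lk Ps w = lk p.items w := fun w =>
    lk_perm Ps p.items (PySem.List.sorted_perm p.items (fun kv => kv.1) false)
      ((((PySem.List.sorted_perm p.items (fun kv => kv.1) false).map (·.1)).nodup_iff).mpr hpn) w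
  rw [show Ls.map (fun pr => pr.2 * lk Ps pr.1) = Ls.map (fun pr => lk p.items pr.1 * pr.2) from by
    apply List.map_congr_left; intro pr _; rw [hlkP]; ring]
  -- sum over sorted v.items = sum over v.items (permutation)
  exact (((PySem.List.sorted_perm v.items (fun kv => kv.1) false).map
    (fun pr => lk p.items pr.1 * pr.2)).sum_eq).symm
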